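-- pv_equiv track=rewrite | github.com/Kon9SHka/python_hw_2 | python_hw_task_4_HARD.py | fibonaccy_function
-- ===== SOURCE A (Python) =====
-- def fibonaccy_function (k, array):
--     for i in range(k+1):
--
--         if i == 0:
--             array[k]=0
--
--         elif i==1:
--             array[k+i]=1
--             array[k-i]=1
--         else:
--             array[k+i]=array[k+i-2]+array[k+i-1]
--             array[k-i]=(-1)**(i+1)*array[k+i]
--
--     return array
-- ===== SOURCE B (Python) =====
-- def _fib(n):
--     # fast-doubling Fibonacci: iterate over the bits of n (MSB first),
--     # maintaining (F(m), F(m+1)) where m is the value of the bits read so far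
--     a, b = 0, 1
--     for bit in bin(n)[2:]:
--         a, b = a * (2 * b - a), a * a + b * b
--         if bit == '1':
--             a, b = b, a + b
--     return a
--
--
-- def fibonaccy_function(k, array):
--     # Each cell is computed independently: array[j] = F(j-k), where the value
--     # at a negative distance n = j-k < 0 is the negafibonacci F(n) =
--     # (-1)**(|n|+1) * F(|n|), computed by fast doubling on |n|.
--     # No sequential recurrence over the array at all.
--     if k < 0:
--         return array
--     for j in range(2 * k + 1):
--         n = j - k
--         m = abs(n)
--         f = _fib(m)
--         array[j] = f if n >= 0 or m % 2 == 1 else -f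
--     return array
-- ===== Notes on version B (the rewrite author's own statement) =====
-- stated objective: alternative
-- what changed: A fills the array by a single sequential loop whose writes depend on previously written cells (array[k+i]=array[k+i-2]+array[k+i-1] with a sign trick for the mirror side); B computes every cell independently as F(j-k) via fast-doubling Fibonacci on |j-k| plus the negafibonacci sign rule, with no recurrence over the array.
import Mathlib
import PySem

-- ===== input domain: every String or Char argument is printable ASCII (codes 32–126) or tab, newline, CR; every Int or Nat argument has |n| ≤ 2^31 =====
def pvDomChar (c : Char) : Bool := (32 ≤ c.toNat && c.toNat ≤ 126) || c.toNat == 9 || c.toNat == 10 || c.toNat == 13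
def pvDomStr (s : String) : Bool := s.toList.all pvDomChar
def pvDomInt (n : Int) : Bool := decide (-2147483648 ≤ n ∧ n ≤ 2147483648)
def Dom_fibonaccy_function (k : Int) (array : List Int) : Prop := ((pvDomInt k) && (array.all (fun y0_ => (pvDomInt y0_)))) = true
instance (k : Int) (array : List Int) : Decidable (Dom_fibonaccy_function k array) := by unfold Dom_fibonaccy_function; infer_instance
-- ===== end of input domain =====

-- B computes every cell independently as F(j-k) by fast-doubling Fibonacci on |j-k| with the
-- negafibonacci sign rule, instead of A's sequential recurrence over previously written cells
-- (alternative algorithm, not faster). Both Pythons mutate `array` in place; the equivalence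
-- proved here is about the returned value.

-- ===== PORT A =====
-- the body of A's for-loop (branches in source order); pyGetD/pySetD are exact for in-range
-- indices, which Pre_ guarantees (outside Pre_ the Python raises IndexError).
def pvBodyA (k : Int) (arr : List Int) (i : Int) : List Int :=
  if i = 0 then
    PySem.List.pySetD arr k 0
  else if i = 1 then
    PySem.List.pySetD (PySem.List.pySetD arr (k+i) 1) (k-i) 1
  else
    let arr1 := PySem.List.pySetD arr (k+i)
      (PySem.List.pyGetD arr (k+i-2) 0 + PySem.List.pyGetD arr (k+i-1) 0)
    PySem.List.pySetD arr1 (k-i) ((-1)^((i+1).toNat) * PySem.List.pyGetD arr1 (k+i) 0)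

def fibonaccy_function (k : Int) (array : List Int) : List Int :=
  (PySem.List.pyRange 0 (k+1) 1).foldl (pvBodyA k) array

-- ===== PORT B =====
-- the loop body of _fib: one bit of n, updating (a, b) = (F(m), F(m+1))
def pvFibFDStep (st : Int × Int) (bit : Bool) : Int × Int :=
  let a' := st.1 * (2 * st.2 - st.1)
  let b' := st.1 * st.1 + st.2 * st.2
  if bit then (b', a' + b') else (a', b')

-- the bits of n, LSB first (empty for 0)
def pvBitsRev (n : Nat) : List Bool :=
  if h : n = 0 then [] else (n % 2 == 1) :: pvBitsRev (n / 2)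
decreasing_by exact Nat.div_lt_self (Nat.pos_of_ne_zero h) one_lt_two

-- bin(n)[2:] as a bit list, MSB first ("0" for n = 0)
def pvBits (n : Nat) : List Bool :=
  if n = 0 then [false] else (pvBitsRev n).reverse

-- _fib of Source B: fold the fast-doubling step over the bits of n
def pvFibFD (n : Nat) : Int := ((pvBits n).foldl pvFibFDStep (0, 1)).1

def fibonaccy_function_alt (k : Int) (array : List Int) : List Int :=
  if k < 0 then array
  else
    (PySem.List.pyRange 0 (2*k+1) 1).foldl
      (fun arr j =>
        let n := j - k
        let m := n.natAbs
        let f := pvFibFD m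
        PySem.List.pySetD arr j (if 0 ≤ n ∨ m % 2 = 1 then f else -f)) array

-- ===== PRECONDITION & SPEC =====
-- Pre_: exactly the inputs on which A returns (otherwise some write array[k+i] reaches past the end and A raises IndexError)
def Pre_fibonaccy_function (k : Int) (array : List Int) : Prop :=
  k < 0 ∨ 2*k < (array.length : Int)
instance (k : Int) (array : List Int) : Decidable (Pre_fibonaccy_function k array) := by
  unfold Pre_fibonaccy_function; infer_instance

def pvWitness_fibonaccy_function : Int × List Int := (2, [9, 9, 9, 9, 9])

def Spec_fibonaccy_function (k : Int) (array : List Int) (out : List Int) : Prop := out = fibonaccy_function_alt k array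
instance (k : Int) (array : List Int) (out : List Int) : Decidable (Spec_fibonaccy_function k array out) := by unfold Spec_fibonaccy_function; infer_instance

-- ===== CLAIM (what is proved, stated in full; the proofs are below) =====
def Claim_equal_fibonaccy_function : Prop := ∀ (k : Int) (array : List Int), Dom_fibonaccy_function k array → Pre_fibonaccy_function k array → Spec_fibonaccy_function k array (fibonaccy_function k array)

-- ===== LEMMAS AND PROOFS =====

-- Fibonacci and signed (negafibonacci) values
def pvFib : Nat → Int
  | 0 => 0
  | 1 => 1
  | n+2 => pvFib n + pvFib (n+1)

def pvNega (i : Nat) : Int := (-1)^(i+1) * pvFib i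

-- the two runs both programs end up producing: positions k-i…k-1 and k…k+i of the result
def pvSegA (i : Nat) : List Int := ((List.range i).map (fun t => pvNega (t+1))).reverse
def pvSegF (i : Nat) : List Int := (List.range (i+1)).map pvFib

-- a list with its slice [a:b) replaced by mid (the loop invariant's shape)
def pvWin (xs mid : List Int) (a b : Nat) : List Int := xs.take a ++ (mid ++ xs.drop b)

theorem pvSegA_length (i : Nat) : (pvSegA i).length = i := by simp [pvSegA]
theorem pvSegF_length (i : Nat) : (pvSegF i).length = i + 1 := by simp [pvSegF]

theorem pvSegA_succ (i : Nat) : pvSegA (i+1) = pvNega (i+1) :: pvSegA i := by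
  simp [pvSegA, List.range_succ]

theorem pvSegF_succ (i : Nat) : pvSegF (i+1) = pvSegF i ++ [pvFib (i+1)] := by
  simp [pvSegF, List.range_succ]

theorem pvWin_getD (xs mid : List Int) (a b t : Nat) (d : Int)
    (hab : a + mid.length = b) (hb : b ≤ xs.length) (ht : t < mid.length) :
    (pvWin xs mid a b).getD (a + t) d = mid.getD t d := by
  have ha : (xs.take a).length = a := by simp; omega
  simp only [pvWin, List.getD_eq_getElem?_getD]
  rw [List.getElem?_append_right (by omega), ha, Nat.add_sub_cancel_left,
    List.getElem?_append_left ht]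

theorem pvWin_set_right (xs mid : List Int) (a b : Nat) (v : Int)
    (hab : a + mid.length = b) (hb : b < xs.length) :
    (pvWin xs mid a b).set b v = pvWin xs (mid ++ [v]) a (b+1) := by
  have ha : (xs.take a).length = a := by simp; omega
  simp only [pvWin]
  rw [List.set_append_right _ _ (by rw [ha]; omega), ha,
    List.set_append_right _ _ (by omega),
    (by omega : b - a - mid.length = 0),
    List.drop_eq_getElem_cons hb, List.set_cons_zero]
  simp
theorem pvWin_set_left (xs mid : List Int) (a b : Nat) (v : Int)
    (hab : a + mid.length = b) (ha : a ≤ xs.length) (hpos : 0 < a) :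
    (pvWin xs mid a b).set (a-1) v = pvWin xs (v :: mid) (a-1) b := by
  have h1 : a - 1 < xs.length := by omega
  have e := List.take_add_one (l := xs) (i := a-1)
  rw [List.getElem?_eq_getElem h1, (by omega : a - 1 + 1 = a)] at e
  simp only [Option.toList_some] at e
  have hl : (xs.take (a-1)).length = a - 1 := by simp; omega
  simp only [pvWin, e, List.append_assoc, List.singleton_append]
  rw [List.set_append_right _ _ (by rw [hl]), hl, Nat.sub_self, List.set_cons_zero]
  simp

-- ===== B-side characterisation =====
theorem pvBitsRev_pos (n : Nat) (h : n ≠ 0) :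
    pvBitsRev n = (n % 2 == 1) :: pvBitsRev (n / 2) := by
  rw [pvBitsRev]; simp [h]

theorem pvFib_eq_fib (n : Nat) : pvFib n = (Nat.fib n : Int) := by
  induction n using pvFib.induct with
  | case1 => simp [pvFib]
  | case2 => simp [pvFib]
  | case3 n ih1 ih2 => rw [pvFib, ih1, ih2, Nat.fib_add_two]; push_cast; ring

theorem pvFib_two_mul (q : Nat) : pvFib (2*q) = pvFib q * (2 * pvFib (q+1) - pvFib q) := by
  have h : Nat.fib q ≤ 2 * Nat.fib (q+1) :=
    le_trans (Nat.fib_le_fib_succ) (by omega)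
  simp only [pvFib_eq_fib, Nat.fib_two_mul]
  push_cast [h]; ring

theorem pvFib_two_mul_add_one (q : Nat) :
    pvFib (2*q+1) = pvFib q * pvFib q + pvFib (q+1) * pvFib (q+1) := by
  simp only [pvFib_eq_fib, Nat.fib_two_mul_add_one]
  push_cast; ring

theorem pvFibFDStep_true (a b : Int) :
    pvFibFDStep (a, b) true = (a*a + b*b, a*(2*b - a) + (a*a + b*b)) := rfl
theorem pvFibFDStep_false (a b : Int) :
    pvFibFDStep (a, b) false = (a*(2*b - a), a*a + b*b) := rfl

theorem pvFD_run (n : Nat) :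
    (pvBitsRev n).reverse.foldl pvFibFDStep (0, 1) = (pvFib n, pvFib (n+1)) := by
  induction n using Nat.strong_induction_on with
  | _ n ih =>
    by_cases h : n = 0
    · subst h
      simp [pvBitsRev, pvFib]
    · rw [pvBitsRev_pos n h, List.reverse_cons, List.foldl_append,
        ih (n/2) (Nat.div_lt_self (Nat.pos_of_ne_zero h) one_lt_two)]
      simp only [List.foldl_cons, List.foldl_nil]
      set q := n / 2 with hq
      have hfib2 : pvFib (2*q+2) = pvFib (2*q) + pvFib (2*q+1) := rfl
      by_cases hb : n % 2 = 1
      · have hbit : (n % 2 == 1) = true := by simp [hb]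
        rw [hbit, pvFibFDStep_true, ← pvFib_two_mul, ← pvFib_two_mul_add_one, ← hfib2,
          (by omega : n = 2*q+1)]
      · have hbit : (n % 2 == 1) = false := by simp [Nat.mod_two_ne_one.mp hb]
        rw [hbit, pvFibFDStep_false, ← pvFib_two_mul, ← pvFib_two_mul_add_one,
          (by omega : n = 2*q)]

theorem pvFibFD_eq (n : Nat) : pvFibFD n = pvFib n := by
  unfold pvFibFD pvBits
  by_cases h : n = 0
  · subst h; decide
  · rw [if_neg h, pvFD_run]

theorem pvNega_eq (t : Nat) :
    pvNega t = if t % 2 = 1 then pvFib t else -pvFib t := by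
  unfold pvNega
  rcases Nat.even_or_odd t with h | h
  · have h0 : ¬ t % 2 = 1 := by have := Nat.even_iff.mp h; omega
    rw [if_neg h0, (Odd.neg_one_pow h.add_one : ((-1:Int))^(t+1) = -1)]
    ring
  · have h1 : t % 2 = 1 := Nat.odd_iff.mp h
    rw [if_pos h1, (Even.neg_one_pow h.add_one : ((-1:Int))^(t+1) = 1)]
    ring

-- B's per-cell value
def pvValB (k j : Nat) : Int :=
  let n : Int := (j : Int) - (k : Int)
  let m := n.natAbs
  if 0 ≤ n ∨ m % 2 = 1 then pvFibFD m else -pvFibFD m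

theorem pvValB_eq (k j : Nat) (hj : j < 2*k+1) :
    pvValB k j = (pvSegA k ++ pvSegF k).getD j 0 := by
  rw [show pvValB k j =
      (if 0 ≤ (j:Int) - (k:Int) ∨ ((j:Int) - (k:Int)).natAbs % 2 = 1
       then pvFibFD ((j:Int) - (k:Int)).natAbs
       else -pvFibFD ((j:Int) - (k:Int)).natAbs) from rfl]
  by_cases hjk : k ≤ j
  · -- forward side: F(j-k)
    have hn : (0:Int) ≤ (j:Int) - (k:Int) := by omega
    have hm : ((j:Int) - (k:Int)).natAbs = j - k := by omega
    rw [if_pos (Or.inl hn), hm, pvFibFD_eq,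
      List.getD_eq_getElem?_getD, List.getElem?_append_right (by simp [pvSegA_length]; omega)]
    simp only [pvSegA_length]
    rw [← List.getD_eq_getElem?_getD, pvSegF,
      PySem.List.getD_map_range _ _ _ _ (by omega)]
  · -- mirror side: negafibonacci at distance t = k - j ≥ 1
    have hj' : j < k := by omega
    have hn : ¬ (0:Int) ≤ (j:Int) - (k:Int) := by omega
    have hm : ((j:Int) - (k:Int)).natAbs = k - j := by omega
    set t := k - j with ht
    have hseg : (pvSegA k ++ pvSegF k).getD j 0 = pvNega t := by
      rw [List.getD_eq_getElem?_getD, List.getElem?_append_left (by simp [pvSegA_length]; omega),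
        pvSegA, List.getElem?_reverse (by simp; omega)]
      simp only [List.length_map, List.length_range]
      rw [List.getElem?_map, List.getElem?_range (by omega)]
      simp only [Option.map_some, Option.getD_some]
      congr 1; omega
    rw [hseg, pvNega_eq, hm, pvFibFD_eq]
    by_cases hodd : t % 2 = 1
    · rw [if_pos (Or.inr hodd), if_pos hodd]
    · rw [if_neg (by exact fun h => h.elim (fun h => hn h) hodd), if_neg hodd]

-- the write loop of B: successive in-range writes array[j] = valf j for j = s, …, s+L-1
theorem pvSetRange (valf : Nat → Int) :
    ∀ (L s : Nat) (xs : List Int), s + L ≤ xs.length →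
    (List.range' s L).foldl (fun arr j => arr.set j (valf j)) xs =
      xs.take s ++ ((List.range' s L).map valf ++ xs.drop (s + L)) := by
  intro L
  induction L with
  | zero => intro s xs h; simp
  | succ L ih =>
    intro s xs h
    rw [List.range'_succ]
    simp only [List.foldl_cons, List.map_cons]
    rw [ih (s+1) (xs.set s (valf s)) (by simp; omega)]
    have hs : s < xs.length := by omega
    have hl : (xs.take s).length = s := by simp; omega
    have e := List.set_eq_take_cons_drop (valf s) hs
    have t1 : (xs.set s (valf s)).take (s+1) = xs.take s ++ [valf s] := by
      rw [e, List.take_append, hl, (by omega : s+1-s = 1), List.take_take,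
        (by omega : min (s+1) s = s)]
      rfl
    have t2 : (xs.set s (valf s)).drop (s+1+L) = xs.drop (s+1+L) := by
      rw [e, List.drop_append, List.drop_eq_nil_of_le (by simp; omega), hl,
        (by omega : s+1+L - s = L + 1), List.drop_succ_cons, List.drop_drop]
      simp [Nat.add_comm]
    rw [t1, t2, (by omega : s + (L+1) = s+1+L)]
    simp

theorem pvMapValB (m : Nat) :
    (List.range' 0 (2*m+1)).map (pvValB m) = pvSegA m ++ pvSegF m := by
  apply List.ext_getElem
  · simp [pvSegA_length, pvSegF_length]; omega
  · intro j h1 h2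
    simp only [List.getElem_map, List.getElem_range']
    have hj : j < 2*m+1 := by simpa using h1
    have := pvValB_eq m j hj
    rw [(by omega : 0 + 1 * j = j)]
    have hlen : j < (pvSegA m ++ pvSegF m).length := by
      simp [pvSegA_length, pvSegF_length]; omega
    rw [← List.getD_eq_getElem _ 0 hlen, ← this]

theorem pvAlt_eq (m : Nat) (xs : List Int) (hlen : 2*m+1 ≤ xs.length) :
    fibonaccy_function_alt (m : Int) xs = pvSegA m ++ (pvSegF m ++ xs.drop (2*m+1)) := by
  unfold fibonaccy_function_alt
  rw [if_neg (by omega)]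
  have hc : 2*(m:Int)+1 = ((2*m+1 : Nat) : Int) := by push_cast; ring
  rw [hc, PySem.List.pyRange_zero_natCast, List.foldl_map]
  have hfun : (fun (arr : List Int) (j : Nat) =>
      PySem.List.pySetD arr ((j:Int))
        (if 0 ≤ (j:Int) - (m:Int) ∨ ((j:Int) - (m:Int)).natAbs % 2 = 1
         then pvFibFD ((j:Int) - (m:Int)).natAbs else -pvFibFD ((j:Int) - (m:Int)).natAbs)) =
      (fun (arr : List Int) (j : Nat) => arr.set j (pvValB m j)) := by
    funext arr j
    rw [PySem.List.pySetD_natCast]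
    rfl
  rw [hfun, List.range_eq_range', pvSetRange (pvValB m) (2*m+1) 0 xs (by omega), pvMapValB]
  simp

-- ===== A-side loop invariant =====
theorem pvLoopA (m : Nat) (xs : List Int) (hn : 2*m < xs.length) :
    ∀ i : Nat, 1 ≤ i → i ≤ m →
    (List.range (i+1)).foldl (fun arr (j : Nat) => pvBodyA (m : Int) arr (j : Int)) xs =
      pvWin xs (pvSegA i ++ pvSegF i) (m-i) (m+i+1) := by
  intro i
  induction i with
  | zero => omega
  | succ i ih =>
    intro _ hi
    by_cases hi1 : i = 0
    · -- first two iterations: array[m]=0; array[m+1]=1; array[m-1]=1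
      subst hi1
      have hm1 : 1 ≤ m := hi
      have hr2 : List.range (0+1+1) = [0, 1] := rfl
      rw [hr2]
      simp only [List.foldl_cons, List.foldl_nil]
      have s0 : pvBodyA (m : Int) xs ((0:Nat) : Int) = xs.set m 0 := by
        simp [pvBodyA, PySem.List.pySetD_natCast]
      rw [s0]
      have e0 : xs.set m 0 = pvWin xs [0] m (m+1) := by
        rw [List.set_eq_take_cons_drop _ (by omega)]; rfl
      have c1 : (m : Int) + ((1:Nat):Int) = ((m+1 : Nat) : Int) := by omega
      have c2 : (m : Int) - ((1:Nat):Int) = ((m-1 : Nat) : Int) := by omega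
      have b1 : pvBodyA (m : Int) (pvWin xs [0] m (m+1)) ((1:Nat) : Int) =
          ((pvWin xs [0] m (m+1)).set (m+1) 1).set (m-1) 1 := by
        simp only [pvBodyA, if_neg (by omega : ((1:Nat):Int) ≠ 0),
          if_pos (by omega : ((1:Nat):Int) = 1), c1, c2, PySem.List.pySetD_natCast]
      rw [e0, b1,
        pvWin_set_right xs [0] m (m+1) 1 (by simp) (by omega),
        pvWin_set_left xs ([0] ++ [1]) m (m+1+1) 1 (by simp) (by omega) (by omega)]
      have hseg : pvSegA (0+1) ++ pvSegF (0+1) = 1 :: ([0] ++ [1]) := by decide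
      rw [hseg]
    · -- iteration i+1, i ≥ 1
      have hii : 1 ≤ i := by omega
      have him : i ≤ m := by omega
      rw [List.range_succ, List.foldl_append, ih hii him]
      simp only [List.foldl_cons, List.foldl_nil]
      set a := m - i with hadef
      set mid := pvSegA i ++ pvSegF i with hmid
      have hmidlen : mid.length = 2*i + 1 := by
        simp [hmid, pvSegA_length, pvSegF_length]; omega
      have hab : a + mid.length = m + i + 1 := by omega
      have hcond0 : ((i+1 : Nat) : Int) ≠ 0 := by omega
      have hcond1 : ((i+1 : Nat) : Int) ≠ 1 := by omega
      simp only [pvBodyA, if_neg hcond0, if_neg hcond1]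
      -- the two reads: array[m+i-1], array[m+i]
      have c1 : (m : Int) + ((i+1 : Nat) : Int) - 2 = ((m+i-1 : Nat) : Int) := by omega
      have c2 : (m : Int) + ((i+1 : Nat) : Int) - 1 = ((m+i : Nat) : Int) := by omega
      have c3 : (m : Int) + ((i+1 : Nat) : Int) = ((m+i+1 : Nat) : Int) := by omega
      have c4 : (m : Int) - ((i+1 : Nat) : Int) = ((a-1 : Nat) : Int) := by omega
      have g1 : (pvWin xs mid a (m+i+1)).getD (m+i-1) 0 = pvFib (i-1) := by
        have h := pvWin_getD xs mid a (m+i+1) (2*i-1) 0 hab (by omega) (by omega)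
        rw [(by omega : a + (2*i-1) = m+i-1)] at h
        rw [h, hmid, List.getD_eq_getElem?_getD,
          List.getElem?_append_right (by simp [pvSegA_length]; omega)]
        simp only [pvSegA_length]
        rw [(by omega : 2*i-1-i = i-1), ← List.getD_eq_getElem?_getD, pvSegF,
          PySem.List.getD_map_range _ _ _ _ (by omega)]
      have g2 : (pvWin xs mid a (m+i+1)).getD (m+i) 0 = pvFib i := by
        have h := pvWin_getD xs mid a (m+i+1) (2*i) 0 hab (by omega) (by omega)
        rw [(by omega : a + (2*i) = m+i)] at h
        rw [h, hmid, List.getD_eq_getElem?_getD,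
          List.getElem?_append_right (by simp [pvSegA_length]; omega)]
        simp only [pvSegA_length]
        rw [(by omega : 2*i-i = i), ← List.getD_eq_getElem?_getD, pvSegF,
          PySem.List.getD_map_range _ _ _ _ (by omega)]
      have gsum : pvFib (i-1) + pvFib i = pvFib (i+1) := by
        obtain ⟨i', rfl⟩ : ∃ i', i = i' + 1 := ⟨i-1, by omega⟩
        simp only [Nat.add_sub_cancel]
        rfl
      have hmid2 : mid ++ [pvFib (i+1)] = pvSegA i ++ pvSegF (i+1) := by
        rw [hmid, pvSegF_succ, ← List.append_assoc]
      have g3 : (pvWin xs (mid ++ [pvFib (i+1)]) a (m+i+2)).getD (m+i+1) 0 = pvFib (i+1) := by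
        have h := pvWin_getD xs (mid ++ [pvFib (i+1)]) a (m+i+2) (2*i+1) 0
          (by simp [hmidlen]; omega) (by omega) (by simp [hmidlen])
        rw [(by omega : a + (2*i+1) = m+i+1)] at h
        rw [h, hmid2, List.getD_eq_getElem?_getD,
          List.getElem?_append_right (by simp [pvSegA_length]; omega)]
        simp only [pvSegA_length]
        rw [(by omega : 2*i+1-i = i+1), ← List.getD_eq_getElem?_getD, pvSegF,
          PySem.List.getD_map_range _ _ _ _ (by omega)]
      have c5 : (((i+1 : Nat) : Int) + 1).toNat = i + 2 := by omega
      rw [c1, c2, c3, c4, PySem.List.pyGetD_natCast, PySem.List.pyGetD_natCast, g1, g2, gsum,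
        PySem.List.pySetD_natCast, PySem.List.pySetD_natCast,
        pvWin_set_right xs mid a (m+i+1) (pvFib (i+1)) hab (by omega),
        PySem.List.pyGetD_natCast, g3, c5]
      have hval : (-1:Int)^(i+2) * pvFib (i+1) = pvNega (i+1) := rfl
      rw [hval,
        pvWin_set_left xs (mid ++ [pvFib (i+1)]) a (m+i+2) (pvNega (i+1))
          (by simp [hmidlen]; omega) (by omega) (by omega), hmid2]
      have hcons : pvNega (i+1) :: (pvSegA i ++ pvSegF (i+1)) = pvSegA (i+1) ++ pvSegF (i+1) := by
        rw [pvSegA_succ]; rfl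
      rw [hcons, (by omega : a - 1 = m - (i+1)), (by omega : m + i + 2 = m + (i+1) + 1)]

-- ===== VERDICT (by name: the statement is the Claim_ definition above) =====
theorem fibonaccy_function_spec : Claim_equal_fibonaccy_function := by
  intro k array _ hpre
  unfold Spec_fibonaccy_function
  unfold fibonaccy_function
  by_cases hk : k < 0
  · rw [PySem.List.pyRange_one_eq_nil (by omega)]
    unfold fibonaccy_function_alt
    rw [if_pos hk]
    rfl
  · obtain ⟨m, rfl⟩ : ∃ m : Nat, k = (m : Int) := ⟨k.toNat, by omega⟩
    have h2 : 2*m < array.length := by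
      rcases hpre with h | h
      · omega
      · omega
    rw [pvAlt_eq m array (by omega)]
    have hcast : (m : Int) + 1 = ((m+1 : Nat) : Int) := by omega
    rw [hcast, PySem.List.pyRange_zero_natCast, List.foldl_map]
    by_cases hm : m = 0
    · subst hm
      have : List.range 1 = [0] := rfl
      rw [this]
      simp only [List.foldl_cons, List.foldl_nil]
      have s0 : pvBodyA ((0:Nat) : Int) array ((0:Nat) : Int) = array.set 0 0 := by
        simp [pvBodyA, PySem.List.pySetD_of_nonneg]
      rw [s0, List.set_eq_take_cons_drop _ (by omega)]
      simp [pvSegA, pvSegF, pvFib]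
    · rw [pvLoopA m array h2 m (by omega) le_rfl]
      unfold pvWin
      rw [(by omega : m - m = 0), (by omega : m + m + 1 = 2*m+1)]
      simp
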